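-- pv_equiv track=rewrite | github.com/sillsdev/machine.py | machine/translation/evaluation.py | _compute_bleu_precision
-- ===== SOURCE A (Python) =====
-- from typing import Iterable, Sequence, Set, Tuple
--
-- def _compute_bleu_precision(translation: Sequence[str], reference: Sequence[str], n: int) -> Tuple[int, int]:
--     total = 0 if n > len(translation) else len(translation) - n + 1
--     ref_total = 0 if n > len(reference) else len(reference) - n + 1
--
--     matched: Set[int] = set()
--     prec = 0
--     for i in range(total):
--         for j in range(ref_total):
--             match = True
--             for k in range(n):
--                 if translation[i + k] != reference[j + k]:
--                     match = False
--                     break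
--
--             if match and j not in matched:
--                 prec += 1
--                 matched.add(j)
--                 break
--     return prec, total
-- ===== SOURCE B (Python) =====
-- def _compute_bleu_precision(translation, reference, n):
--     total = max(0, len(translation) - n + 1)
--     ref_total = max(0, len(reference) - n + 1)
--
--     ref_counts = {}
--     for j in range(ref_total):
--         g = tuple(reference[j + k] for k in range(n))
--         ref_counts[g] = ref_counts.get(g, 0) + 1
--
--     prec = 0
--     for i in range(total):
--         g = tuple(translation[i + k] for k in range(n))
--         c = ref_counts.get(g, 0)
--         if c > 0:
--             prec += 1
--             ref_counts[g] = c - 1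
--     return prec, total
-- ===== Notes on version B (the rewrite author's own statement) =====
-- stated objective: faster
-- what changed: Replaces the quadratic greedy scan (for each translation n-gram, rescan all reference positions for the first unmatched match) by a single pass that counts reference n-grams in a dict and then, per translation n-gram, decrements its remaining reference count, i.e. clipped counting
import Mathlib
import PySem

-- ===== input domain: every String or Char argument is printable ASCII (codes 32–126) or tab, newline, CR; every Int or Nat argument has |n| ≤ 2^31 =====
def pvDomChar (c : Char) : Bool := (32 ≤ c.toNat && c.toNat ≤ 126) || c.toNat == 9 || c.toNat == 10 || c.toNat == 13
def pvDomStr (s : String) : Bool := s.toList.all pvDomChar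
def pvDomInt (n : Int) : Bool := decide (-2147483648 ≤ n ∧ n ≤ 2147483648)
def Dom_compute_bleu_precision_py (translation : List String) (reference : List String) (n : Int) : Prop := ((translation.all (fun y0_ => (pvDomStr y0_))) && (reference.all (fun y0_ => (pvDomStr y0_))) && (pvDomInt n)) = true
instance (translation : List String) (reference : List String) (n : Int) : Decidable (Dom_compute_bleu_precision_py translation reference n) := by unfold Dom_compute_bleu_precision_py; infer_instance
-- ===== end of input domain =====

-- B replaces A's quadratic greedy rescan of the reference by one dict of reference
-- n-gram counts that is clip-decremented in a single pass over the translation (objective: faster).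

-- ===== PORT A =====
-- Literal port of A: greedy scan — for each translation position, rescan all reference
-- positions for the first still-unmatched n-gram match (the inner j-loop with break is find?;
-- the k-loop with break computing `match` is .all).  seq[i+k] is ported as pyGet?
-- (the executed indices are always in range, so the Option never hides an IndexError).
def compute_bleu_precision_py (translation : List String) (reference : List String) (n : Int) : Int × Int :=
  let total : Int := if n > (translation.length : Int) then 0 else (translation.length : Int) - n + 1
  let ref_total : Int := if n > (reference.length : Int) then 0 else (reference.length : Int) - n + 1
  let st := (PySem.List.pyRange 0 total 1).foldl (fun st i =>
      match (PySem.List.pyRange 0 ref_total 1).find? (fun j =>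
          ((PySem.List.pyRange 0 n 1).all fun k =>
            PySem.List.pyGet? translation (i + k) == PySem.List.pyGet? reference (j + k))
          && !(PySem.Set.contains st.1 j)) with
      | some j => (PySem.Set.add st.1 j, st.2 + 1)
      | none => st)
    ((PySem.Set.empty : PySem.Set Int), (0 : Int))
  (st.2, total)

-- ===== PORT B =====
-- Port of Source B: count reference n-grams in a dict, then one clip-decrementing pass over the
-- translation n-grams.  The tuple(seq[i+k] for k in range(n)) is ported as the list of the
-- pyGet? lookups (the executed indices are always in range).
def compute_bleu_precision_py_alt (translation : List String) (reference : List String) (n : Int) : Int × Int :=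
  let total : Int := max 0 ((translation.length : Int) - n + 1)
  let ref_total : Int := max 0 ((reference.length : Int) - n + 1)
  let ref_counts := (PySem.List.pyRange 0 ref_total 1).foldl (fun d j =>
      let g := (PySem.List.pyRange 0 n 1).map fun k => PySem.List.pyGet? reference (j + k)
      d.insert g (d.getD g 0 + 1))
    (PySem.Dict.empty : PySem.Dict (List (Option String)) Int)
  let st := (PySem.List.pyRange 0 total 1).foldl (fun st i =>
      let g := (PySem.List.pyRange 0 n 1).map fun k => PySem.List.pyGet? translation (i + k)
      let c := st.1.getD g 0
      if c > 0 then (st.1.insert g (c - 1), st.2 + 1) else st)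
    (ref_counts, (0 : Int))
  (st.2, total)

-- ===== PRECONDITION & SPEC =====
def Spec_compute_bleu_precision_py (translation : List String) (reference : List String) (n : Int) (out : Int × Int) : Prop := out = compute_bleu_precision_py_alt translation reference n
instance (translation : List String) (reference : List String) (n : Int) (out : Int × Int) : Decidable (Spec_compute_bleu_precision_py translation reference n out) := by unfold Spec_compute_bleu_precision_py; infer_instance

-- ===== CLAIM (what is proved, stated in full; the proofs are below) =====
def Claim_equal_compute_bleu_precision_py : Prop := ∀ (translation : List String) (reference : List String) (n : Int), Dom_compute_bleu_precision_py translation reference n → Spec_compute_bleu_precision_py translation reference n (compute_bleu_precision_py translation reference n)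

-- ===== LEMMAS AND PROOFS =====

-- A's loop body (abstract n-gram functions T for the translation, R for the reference;
-- rr = the list of reference positions).
def pvStepA (T R : Int → List (Option String)) (rr : List Int)
    (st : PySem.Set Int × Int) (i : Int) : PySem.Set Int × Int :=
  match rr.find? (fun j => (T i == R j) && !(PySem.Set.contains st.1 j)) with
  | some j => (PySem.Set.add st.1 j, st.2 + 1)
  | none => st

-- B's loop body.
def pvStepB (T : Int → List (Option String))
    (st : PySem.Dict (List (Option String)) Int × Int) (i : Int) :
    PySem.Dict (List (Option String)) Int × Int :=
  let g := T i
  let c := st.1.getD g 0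
  if c > 0 then (st.1.insert g (c - 1), st.2 + 1) else st

-- Invariant: the dict entry of each n-gram g is the number of reference positions whose
-- n-gram is g and which A has not matched yet.
def pvInv (R : Int → List (Option String)) (rr : List Int)
    (m : PySem.Set Int) (d : PySem.Dict (List (Option String)) Int) : Prop :=
  ∀ g, d.getD g 0 = ((rr.filter fun j => (R j == g) && !(PySem.Set.contains m j)).length : Int)

lemma pv_all_beq_map {α β : Type} [BEq β] (l : List α) (f g : α → β) :
    (l.all fun x => f x == g x) = (l.map f == l.map g) := by
  induction l with
  | nil => rfl
  | cons a t ih => simp only [List.all_cons, List.map_cons, List.cons_beq_cons, ih]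

lemma pv_contains_add (m : PySem.Set Int) (j0 j : Int) :
    PySem.Set.contains (PySem.Set.add m j0) j = (PySem.Set.contains m j || j == j0) := by
  rw [Bool.eq_iff_iff]
  simp [PySem.Set.contains_iff, PySem.Set.mem_add]

lemma pv_filter_length_split {l : List Int} (p : Int → Bool) {j0 : Int}
    (hnd : l.Nodup) (hmem : j0 ∈ l) (hp : p j0 = true) :
    (l.filter p).length = (l.filter fun x => p x && !(x == j0)).length + 1 := by
  induction l with
  | nil => cases hmem
  | cons a t ih =>
    rcases List.nodup_cons.mp hnd with ⟨ha, hndt⟩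
    by_cases haj : a = j0
    · subst haj
      have he : (t.filter fun x => p x && !(x == a)) = t.filter p := by
        apply List.filter_congr
        intro x hx
        have hxa : ¬ (x == a) = true := by
          simp only [beq_iff_eq]
          intro hh; exact ha (hh ▸ hx)
        simp [hxa]
      simp [List.filter_cons, hp, he]
    · have hmem' : j0 ∈ t := by
        rcases List.mem_cons.mp hmem with h | h
        · exact absurd h.symm haj
        · exact h
      have haj' : ¬ (a == j0) = true := by simp [haj]
      cases hpa : p a <;> simp [List.filter_cons, hpa, haj', ih hndt hmem']

lemma pv_step_sim (T R : Int → List (Option String)) (rr : List Int) (hnd : rr.Nodup)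
    (m : PySem.Set Int) (d : PySem.Dict (List (Option String)) Int) (p q i : Int)
    (h : pvInv R rr m d) :
    pvInv R rr (pvStepA T R rr (m, p) i).1 (pvStepB T (d, q) i).1 ∧
    (pvStepA T R rr (m, p) i).2 - p = (pvStepB T (d, q) i).2 - q := by
  cases hfind : rr.find? (fun j => (T i == R j) && !(PySem.Set.contains m j)) with
  | none =>
    have hall := List.find?_eq_none.mp hfind
    have hfil : (rr.filter fun j => (R j == T i) && !(PySem.Set.contains m j)) = [] := by
      rw [List.filter_eq_nil_iff]
      intro j hj
      have hj' := hall j hj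
      simp only [Bool.and_eq_true, Bool.not_eq_true', beq_iff_eq, not_and] at hj' ⊢
      intro h1 h2
      exact hj' h1.symm h2
    have hc : d.getD (T i) 0 = 0 := by rw [h (T i), hfil]; rfl
    have hA : pvStepA T R rr (m, p) i = (m, p) := by unfold pvStepA; rw [hfind]
    have hB : pvStepB T (d, q) i = (d, q) := by
      simp only [pvStepB]; rw [hc]; norm_num
    rw [hA, hB]
    exact ⟨h, by simp⟩
  | some j0 =>
    have hp := List.find?_some hfind
    have hmem := List.mem_of_find?_eq_some hfind
    rw [Bool.and_eq_true] at hp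
    have hR : R j0 = T i := by
      have := hp.1; rw [beq_iff_eq] at this; exact this.symm
    have hnm : PySem.Set.contains m j0 = false := by
      have h2 := hp.2; rw [Bool.not_eq_true'] at h2; exact h2
    have hsplit := pv_filter_length_split (l := rr)
      (fun j => (R j == T i) && !(PySem.Set.contains m j)) hnd hmem
      (by simp only [hR, beq_self_eq_true, hnm, Bool.not_false, Bool.and_self])
    have hpos : 0 < d.getD (T i) 0 := by
      rw [h (T i)]
      rw [hsplit]
      push_cast
      omega
    have hA : pvStepA T R rr (m, p) i = (PySem.Set.add m j0, p + 1) := by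
      unfold pvStepA; rw [hfind]
    have hB : pvStepB T (d, q) i = (d.insert (T i) (d.getD (T i) 0 - 1), q + 1) := by
      simp only [pvStepB]; rw [if_pos hpos]
    rw [hA, hB]
    refine ⟨?_, by simp⟩
    show pvInv R rr (PySem.Set.add m j0) (d.insert (T i) (d.getD (T i) 0 - 1))
    intro g
    by_cases hg : g = T i
    · subst hg
      rw [PySem.Dict.getD_insert, if_pos rfl, h (T i)]
      have hpred : ∀ j, ((R j == T i) && !(PySem.Set.contains (PySem.Set.add m j0) j))
          = (((R j == T i) && !(PySem.Set.contains m j)) && !(j == j0)) := by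
        intro j
        rw [pv_contains_add]
        cases (R j == T i) <;> cases PySem.Set.contains m j <;> cases (j == j0) <;> rfl
      rw [List.filter_congr (fun j _ => hpred j)]
      rw [hsplit]
      push_cast
      ring
    · rw [PySem.Dict.getD_insert, if_neg hg, h g]
      congr 2
      apply List.filter_congr
      intro j hj
      rw [pv_contains_add]
      by_cases hjj : j = j0
      · subst hjj
        have hRg : (R j == g) = false := by
          rw [hR]; simp only [beq_eq_false_iff_ne, ne_eq]
          exact fun hh => hg hh.symm
        simp [hRg]
      · have : (j == j0) = false := by simp [hjj]
        rw [this]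
        simp

lemma pv_fold_sim (T R : Int → List (Option String)) (rr : List Int) (hnd : rr.Nodup)
    (l : List Int) :
    ∀ (m : PySem.Set Int) (d : PySem.Dict (List (Option String)) Int) (p : Int),
      pvInv R rr m d →
      (l.foldl (pvStepA T R rr) (m, p)).2 = (l.foldl (pvStepB T) (d, p)).2 := by
  induction l with
  | nil => intro m d p _; rfl
  | cons i t ih =>
    intro m d p h
    obtain ⟨h1, h2⟩ := pv_step_sim T R rr hnd m d p p i h
    have e1 : pvStepA T R rr (m, p) i
        = ((pvStepA T R rr (m, p) i).1, (pvStepA T R rr (m, p) i).2) := rfl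
    have e2 : pvStepB T (d, p) i
        = ((pvStepB T (d, p) i).1, (pvStepB T (d, p) i).2) := rfl
    rw [List.foldl_cons, List.foldl_cons, e1, e2]
    have hpe : (pvStepA T R rr (m, p) i).2 = (pvStepB T (d, p) i).2 := by omega
    rw [hpe]
    exact ih _ _ _ h1

lemma pv_init_inv (R : Int → List (Option String)) (rr : List Int) :
    pvInv R rr PySem.Set.empty
      (rr.foldl (fun d j => d.insert (R j) (d.getD (R j) 0 + 1)) PySem.Dict.empty) := by
  intro g
  have hmap : rr.foldl (fun d j => d.insert (R j) (d.getD (R j) 0 + 1)) PySem.Dict.empty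
      = (rr.map R).foldl (fun d x => d.insert x (d.getD x 0 + 1))
          (PySem.Dict.empty : PySem.Dict (List (Option String)) Int) :=
    (List.foldl_map (f := R) (g := fun d x => d.insert x (d.getD x 0 + 1)) (l := rr)
      (init := (PySem.Dict.empty : PySem.Dict (List (Option String)) Int))).symm
  rw [hmap, PySem.Dict.getD_foldl_insert_add_one]
  simp [List.count_eq_countP, List.countP_map, ← List.countP_eq_length_filter,
    PySem.Set.empty, PySem.Set.contains, Function.comp_def]

-- ===== VERDICT (by name: the statement is the Claim_ definition above) =====
theorem compute_bleu_precision_py_spec : Claim_equal_compute_bleu_precision_py := by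
  intro translation reference n _hdom
  unfold Spec_compute_bleu_precision_py compute_bleu_precision_py compute_bleu_precision_py_alt
  have htot : (if n > (translation.length : Int) then 0 else (translation.length : Int) - n + 1)
      = max 0 ((translation.length : Int) - n + 1) := by
    split_ifs with hh <;> omega
  have hrtot : (if n > (reference.length : Int) then 0 else (reference.length : Int) - n + 1)
      = max 0 ((reference.length : Int) - n + 1) := by
    split_ifs with hh <;> omega
  simp only [htot, hrtot, pv_all_beq_map]
  refine congrArg₂ Prod.mk ?_ rfl
  exact pv_fold_sim
    (fun i => (PySem.List.pyRange 0 n 1).map fun k => PySem.List.pyGet? translation (i + k))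
    (fun j => (PySem.List.pyRange 0 n 1).map fun k => PySem.List.pyGet? reference (j + k))
    (PySem.List.pyRange 0 (max 0 ((reference.length : Int) - n + 1)) 1)
    (PySem.List.nodup_pyRange_one _ _)
    (PySem.List.pyRange 0 (max 0 ((translation.length : Int) - n + 1)) 1)
    PySem.Set.empty _ 0
    (pv_init_inv _ _)
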